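-- pv_equiv track=rewrite | github.com/89shining/data_process | Dataset_process/SAM/Rectal_GTVp/INFO_size/threebox_volume_info.py | find_min_margin
-- ===== SOURCE A (Python) =====
-- def find_min_margin(three_box, full_box):
--     x_min_prompt, y_min_prompt, x_max_prompt, y_max_prompt = three_box
--     x_min_full, y_min_full, x_max_full, y_max_full = full_box
--
--     for margin in range(0, 100):  # 100为上限，理论不会超过
--         x_min_ext = x_min_prompt - margin
--         y_min_ext = y_min_prompt - margin
--         x_max_ext = x_max_prompt + margin
--         y_max_ext = y_max_prompt + margin
--
--         # 判断是否包含 full_box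
--         if (x_min_ext <= x_min_full and y_min_ext <= y_min_full and
--             x_max_ext >= x_max_full and y_max_ext >= y_max_full):
--             return margin  # 找到最小 margin
--     return -1  # 如果到100都不满足
-- ===== SOURCE B (Python) =====
-- def find_min_margin(three_box, full_box):
--     x_min_prompt, y_min_prompt, x_max_prompt, y_max_prompt = three_box
--     x_min_full, y_min_full, x_max_full, y_max_full = full_box
--     # smallest non-negative integer margin whose expansion covers full_box
--     m = max(0, x_min_prompt - x_min_full, y_min_prompt - y_min_full,
--             x_max_full - x_max_prompt, y_max_full - y_max_prompt)
--     return m if m < 100 else -1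
-- ===== Notes on version B (the rewrite author's own statement) =====
-- stated objective: simpler
-- what changed: Replaced the 100-iteration linear search for the first covering margin by a closed-form max of the four required offsets (clamped at 0, -1 if >= 100).
import Mathlib
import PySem

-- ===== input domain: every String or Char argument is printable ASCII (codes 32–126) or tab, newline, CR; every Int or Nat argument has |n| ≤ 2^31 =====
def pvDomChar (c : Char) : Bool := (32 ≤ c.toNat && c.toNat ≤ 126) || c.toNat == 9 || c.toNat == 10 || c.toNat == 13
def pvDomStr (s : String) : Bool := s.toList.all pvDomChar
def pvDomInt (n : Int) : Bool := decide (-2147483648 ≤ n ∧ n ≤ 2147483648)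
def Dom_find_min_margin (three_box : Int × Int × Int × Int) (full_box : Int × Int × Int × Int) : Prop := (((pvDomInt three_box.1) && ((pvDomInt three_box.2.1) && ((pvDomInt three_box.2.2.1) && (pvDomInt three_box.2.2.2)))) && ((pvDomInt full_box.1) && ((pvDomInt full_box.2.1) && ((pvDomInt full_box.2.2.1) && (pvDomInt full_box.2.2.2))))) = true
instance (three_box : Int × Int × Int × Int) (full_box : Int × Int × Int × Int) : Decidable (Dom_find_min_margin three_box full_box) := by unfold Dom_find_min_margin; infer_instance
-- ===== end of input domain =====

-- B replaces A's 100-iteration first-satisfying-margin search by a closed-form max of the four needed offsets (simpler).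


-- ===== PORT A =====
-- the for-loop with early return: first margin in the list satisfying the containment test, else -1
def pvLoopA (three_box : Int × Int × Int × Int) (full_box : Int × Int × Int × Int) : List Int → Int
  | [] => -1
  | margin :: rest =>
      if three_box.1 - margin ≤ full_box.1 ∧ three_box.2.1 - margin ≤ full_box.2.1 ∧
         three_box.2.2.1 + margin ≥ full_box.2.2.1 ∧ three_box.2.2.2 + margin ≥ full_box.2.2.2
      then margin
      else pvLoopA three_box full_box rest

def find_min_margin (three_box : Int × Int × Int × Int) (full_box : Int × Int × Int × Int) : Int :=
  pvLoopA three_box full_box (PySem.List.pyRange 0 100 1)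

-- ===== PORT B =====
def find_min_margin_alt (three_box : Int × Int × Int × Int) (full_box : Int × Int × Int × Int) : Int :=
  let m := max 0 (max (three_box.1 - full_box.1) (max (three_box.2.1 - full_box.2.1)
              (max (full_box.2.2.1 - three_box.2.2.1) (full_box.2.2.2 - three_box.2.2.2))))
  if m < 100 then m else -1

-- ===== PRECONDITION & SPEC =====
def Spec_find_min_margin (three_box : Int × Int × Int × Int) (full_box : Int × Int × Int × Int) (out : Int) : Prop := out = find_min_margin_alt three_box full_box
instance (three_box : Int × Int × Int × Int) (full_box : Int × Int × Int × Int) (out : Int) : Decidable (Spec_find_min_margin three_box full_box out) := by unfold Spec_find_min_margin; infer_instance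

-- ===== CLAIM (what is proved, stated in full; the proofs are below) =====
def Claim_equal_find_min_margin : Prop := ∀ (three_box : Int × Int × Int × Int) (full_box : Int × Int × Int × Int), Dom_find_min_margin three_box full_box → Spec_find_min_margin three_box full_box (find_min_margin three_box full_box)

-- ===== LEMMAS AND PROOFS =====
-- the four-way max B computes, as a proof abbreviation
def pvNeeded (three_box : Int × Int × Int × Int) (full_box : Int × Int × Int × Int) : Int :=
  max (three_box.1 - full_box.1) (max (three_box.2.1 - full_box.2.1)
    (max (full_box.2.2.1 - three_box.2.2.1) (full_box.2.2.2 - three_box.2.2.2)))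

theorem pvLoopA_pyRange (three_box full_box : Int × Int × Int × Int) :
    ∀ (n : Nat) (a : Int), a + n = 100 →
      pvLoopA three_box full_box (PySem.List.pyRange a 100 1) =
        (if max a (pvNeeded three_box full_box) < 100 then max a (pvNeeded three_box full_box) else -1) := by
  intro n
  induction n with
  | zero =>
      intro a ha
      have h100 : a = 100 := by omega
      subst h100
      rw [PySem.List.pyRange_one_eq_nil le_rfl]
      simp only [pvLoopA]
      have : ¬ max (100 : Int) (pvNeeded three_box full_box) < 100 := by
        simp [lt_irrefl]
      simp [this]
  | succ n ih =>
      intro a ha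
      have hlt : a < 100 := by omega
      rw [PySem.List.pyRange_one_cons hlt]
      simp only [pvLoopA]
      by_cases hc : three_box.1 - a ≤ full_box.1 ∧ three_box.2.1 - a ≤ full_box.2.1 ∧
          three_box.2.2.1 + a ≥ full_box.2.2.1 ∧ three_box.2.2.2 + a ≥ full_box.2.2.2
      · have hle : pvNeeded three_box full_box ≤ a := by
          unfold pvNeeded; omega
        have hmax : max a (pvNeeded three_box full_box) = a := max_eq_left hle
        rw [if_pos hc, hmax, if_pos hlt]
      · have hgt : a < pvNeeded three_box full_box := by
          unfold pvNeeded
          rcases not_and_or.mp hc with h | h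
          · omega
          · rcases not_and_or.mp h with h | h
            · omega
            · rcases not_and_or.mp h with h | h <;> omega
        have hmax : max (a + 1) (pvNeeded three_box full_box) = max a (pvNeeded three_box full_box) := by
          omega
        rw [if_neg hc, ih (a + 1) (by omega), hmax]

-- ===== VERDICT (by name: the statement is the Claim_ definition above) =====
theorem find_min_margin_spec : Claim_equal_find_min_margin := by
  intro three_box full_box _hdom
  unfold Spec_find_min_margin find_min_margin find_min_margin_alt
  rw [pvLoopA_pyRange three_box full_box 100 0 (by norm_num)]
  rfl
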